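-- pv_equiv track=rewrite | github.com/lemon52/SmartETL | wikidata_filter/integrations/unstructured/text.py | _combine_paragraphs_less_than_min
-- ===== SOURCE A (Python) =====
-- from typing import IO, Any, Callable, Literal, Optional
--
-- def _combine_paragraphs_less_than_min(
--     split_paragraphs: list[str],
--     max_partition: Optional[int] = 1500,
--     min_partition: Optional[int] = 0,
-- ) -> list[str]:
--     """Combine paragraphs less than `min_partition` while not exceeding `max_partition`."""
--     min_partition = min_partition or 0
--     max_possible_partition = len(" ".join(split_paragraphs))
--     max_partition = max_partition or max_possible_partition
--
--     combined_paras: list[str] = []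
--     combined_idxs: list[int] = []
--     for i, para in enumerate(split_paragraphs):
--         if i in combined_idxs:
--             continue
--         # Paragraphs have already been split to fit `max_partition`, so they can be safely added
--         # to the final list of chunks if they are also greater than `min_partition`
--         if len(para) >= min_partition:
--             combined_paras.append(para)
--         else:
--             combined_para = para
--             for j, next_para in enumerate(split_paragraphs[i + 1 :]):  # noqa
--                 # Combine the current paragraph(s), e.g. `combined_para` with the next paragraph(s)
--                 # as long as they don't exceed `max_partition`, and keep track of the indices
--                 # that have been combined.
--                 if len(combined_para) + len(next_para) + 1 <= max_partition:
--                     combined_idxs.append(i + j + 1)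
--                     combined_para += " " + next_para
--                 else:
--                     break
--             combined_paras.append(combined_para)
--
--     return combined_paras
-- ===== SOURCE B (Python) =====
-- def _combine_paragraphs_less_than_min(
--     split_paragraphs: list[str],
--     max_partition=1500,
--     min_partition=0,
-- ) -> list[str]:
--     """Combine paragraphs less than `min_partition` while not exceeding `max_partition`."""
--     min_partition = min_partition or 0
--     max_partition = max_partition or len(" ".join(split_paragraphs))
--
--     out: list[str] = []
--     i = 0
--     n = len(split_paragraphs)
--     while i < n:
--         para = split_paragraphs[i]
--         if len(para) >= min_partition:
--             out.append(para)
--             i += 1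
--         else:
--             parts = [para]
--             total = len(para)
--             j = i + 1
--             while j < n and total + len(split_paragraphs[j]) + 1 <= max_partition:
--                 total += len(split_paragraphs[j]) + 1
--                 parts.append(split_paragraphs[j])
--                 j += 1
--             out.append(" ".join(parts))
--             i = j
--     return out
-- ===== Notes on version B (the rewrite author's own statement) =====
-- stated objective: faster
-- what changed: Replaced the enumerate loop with an O(n^2) membership scan of combined_idxs and quadratic string += by a single forward pass with an index pointer (merged indices are always a contiguous block, so no index bookkeeping is needed) that collects parts in a list and joins them once.
import Mathlib
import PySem

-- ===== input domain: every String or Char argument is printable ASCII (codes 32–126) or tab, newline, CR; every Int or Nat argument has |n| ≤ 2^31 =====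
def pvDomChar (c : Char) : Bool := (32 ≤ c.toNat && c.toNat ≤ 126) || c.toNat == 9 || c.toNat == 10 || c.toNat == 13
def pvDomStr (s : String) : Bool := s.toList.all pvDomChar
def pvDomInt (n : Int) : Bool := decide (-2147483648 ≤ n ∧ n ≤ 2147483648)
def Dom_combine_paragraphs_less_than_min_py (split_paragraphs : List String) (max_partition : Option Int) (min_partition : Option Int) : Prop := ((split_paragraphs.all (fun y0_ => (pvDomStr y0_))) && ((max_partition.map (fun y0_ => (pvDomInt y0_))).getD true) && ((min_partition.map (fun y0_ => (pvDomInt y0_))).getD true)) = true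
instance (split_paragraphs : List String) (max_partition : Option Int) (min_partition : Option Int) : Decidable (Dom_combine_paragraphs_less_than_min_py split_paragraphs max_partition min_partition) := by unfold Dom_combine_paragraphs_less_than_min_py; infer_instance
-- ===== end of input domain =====

-- B replaces A's quadratic combined_idxs membership scan and string += with a single
-- forward pass over the list (merged indices are contiguous) joining collected parts once.


-- ===== PORT A =====
-- inner `for j, next_para in enumerate(split_paragraphs[i+1:])` loop with break
def pvInnerA (max_p : Int) (i : Int) : List String → Int → String → List Int → String × List Int
  | [], _, combined, idxs => (combined, idxs)
  | next :: rest, j, combined, idxs =>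
    if PySem.Str.len combined + PySem.Str.len next + 1 ≤ max_p then
      pvInnerA max_p i rest (j + 1) (combined ++ " " ++ next) (idxs ++ [i + j + 1])
    else (combined, idxs)

-- outer `for i, para in enumerate(split_paragraphs)` loop, state (combined_paras, combined_idxs)
def pvOuterA (split : List String) (max_p min_p : Int) : List (Int × String) → List String → List Int → List String
  | [], paras, _ => paras
  | (i, para) :: rest, paras, idxs =>
    if idxs.contains i then pvOuterA split max_p min_p rest paras idxs
    else if min_p ≤ PySem.Str.len para then pvOuterA split max_p min_p rest (paras ++ [para]) idxs
    else
      let r := pvInnerA max_p i (PySem.List.slice split (some (i + 1)) none) 0 para idxs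
      pvOuterA split max_p min_p rest (paras ++ [r.1]) r.2

def combine_paragraphs_less_than_min_py (split_paragraphs : List String) (max_partition : Option Int) (min_partition : Option Int) : List String :=
  -- `min_partition = min_partition or 0` / `max_partition = max_partition or max_possible_partition`
  let min_p : Int := match min_partition with | none => 0 | some v => if v == 0 then 0 else v
  let max_possible : Int := PySem.Str.len (PySem.Str.join " " split_paragraphs)
  let max_p : Int := match max_partition with | none => max_possible | some v => if v == 0 then max_possible else v
  pvOuterA split_paragraphs max_p min_p (PySem.List.enumerate split_paragraphs 0) [] []

-- ===== PORT B =====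
-- B's inner `while j < n and total + len(..) + 1 <= max_partition` loop: returns (parts taken, remainder)
def pvTakeMerge (max_p : Int) (total : Int) : List String → List String × List String
  | [] => ([], [])
  | p :: rest =>
    if total + PySem.Str.len p + 1 ≤ max_p then
      let pr := pvTakeMerge max_p (total + PySem.Str.len p + 1) rest
      (p :: pr.1, pr.2)
    else ([], p :: rest)

-- termination helper for pvGoB (cited by its decreasing_by)
theorem pvTakeMerge_snd_le (max_p : Int) : ∀ (l : List String) (total : Int), ((pvTakeMerge max_p total l).2).length ≤ l.length := by
  intro l
  induction l with
  | nil => intro t; simp [pvTakeMerge]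
  | cons p rest ih =>
    intro t
    simp only [pvTakeMerge]
    split
    · exact Nat.le_succ_of_le (ih _)
    · simp

-- B's outer `while i < n` pointer loop, expressed on the remaining suffix
def pvGoB (max_p min_p : Int) : List String → List String
  | [] => []
  | para :: rest =>
    if min_p ≤ PySem.Str.len para then para :: pvGoB max_p min_p rest
    else
      let pr := pvTakeMerge max_p (PySem.Str.len para) rest
      PySem.Str.join " " (para :: pr.1) :: pvGoB max_p min_p pr.2
  termination_by l => l.length
  decreasing_by
  · simp
  · exact Nat.lt_succ_of_le (pvTakeMerge_snd_le _ rest _)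

def combine_paragraphs_less_than_min_py_alt (split_paragraphs : List String) (max_partition : Option Int) (min_partition : Option Int) : List String :=
  let min_p : Int := match min_partition with | none => 0 | some v => if v == 0 then 0 else v
  let max_p : Int := match max_partition with
    | none => PySem.Str.len (PySem.Str.join " " split_paragraphs)
    | some v => if v == 0 then PySem.Str.len (PySem.Str.join " " split_paragraphs) else v
  pvGoB max_p min_p split_paragraphs

-- ===== PRECONDITION & SPEC =====
def Spec_combine_paragraphs_less_than_min_py (split_paragraphs : List String) (max_partition : Option Int) (min_partition : Option Int) (out : List String) : Prop := out = combine_paragraphs_less_than_min_py_alt split_paragraphs max_partition min_partition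
instance (split_paragraphs : List String) (max_partition : Option Int) (min_partition : Option Int) (out : List String) : Decidable (Spec_combine_paragraphs_less_than_min_py split_paragraphs max_partition min_partition out) := by unfold Spec_combine_paragraphs_less_than_min_py; infer_instance

-- ===== CLAIM (what is proved, stated in full; the proofs are below) =====
def Claim_equal_combine_paragraphs_less_than_min_py : Prop := ∀ (split_paragraphs : List String) (max_partition : Option Int) (min_partition : Option Int), Dom_combine_paragraphs_less_than_min_py split_paragraphs max_partition min_partition → Spec_combine_paragraphs_less_than_min_py split_paragraphs max_partition min_partition (combine_paragraphs_less_than_min_py split_paragraphs max_partition min_partition)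

-- ===== LEMMAS AND PROOFS =====

theorem pvTakeMerge_split (max_p : Int) : ∀ (l : List String) (total : Int), (pvTakeMerge max_p total l).1 ++ (pvTakeMerge max_p total l).2 = l := by
  intro l
  induction l with
  | nil => intro t; simp [pvTakeMerge]
  | cons p rest ih =>
    intro t
    simp only [pvTakeMerge]
    split
    · simpa using ih _
    · simp

theorem pvCharsJoin_merge (sep x y : List Char) (L : List (List Char)) :
    PySem.Chars.join sep (x :: y :: L) = PySem.Chars.join sep ((x ++ sep ++ y) :: L) := by
  cases L with
  | nil => simp [PySem.Chars.join_cons_cons, PySem.Chars.join_singleton]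
  | cons z L => simp [PySem.Chars.join_cons_cons]

-- join " " (a :: l) is the foldl that A's `combined_para += " " + next_para` computes
theorem pvJoin_foldl : ∀ (l : List String) (a : String), PySem.Str.join " " (a :: l) = l.foldl (fun acc p => acc ++ " " ++ p) a := by
  intro l
  induction l with
  | nil =>
    intro a
    apply String.toList_inj.mp
    simp [PySem.Str.toList_join, PySem.Chars.join_singleton]
  | cons b l ih =>
    intro a
    have hstep : PySem.Str.join " " (a :: b :: l) = PySem.Str.join " " ((a ++ " " ++ b) :: l) := by
      apply String.toList_inj.mp
      simp only [PySem.Str.toList_join, List.map_cons, String.toList_append]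
      have : (" ").toList = [' '] := by decide
      rw [this, pvCharsJoin_merge]
    rw [hstep, ih, List.foldl_cons]

theorem pvRangeShift (c : Int) (n : Nat) :
    c :: (List.range n).map (fun k : Nat => c + 1 + (k : Int)) = (List.range (n + 1)).map (fun k : Nat => c + (k : Int)) := by
  rw [List.range_succ_eq_map, List.map_cons, List.map_map]
  congr 1
  · simp
  · apply List.map_congr_left
    intro t _
    simp only [Function.comp, Nat.succ_eq_add_one]
    push_cast
    ring

theorem pvLen_glue (cp p : String) : PySem.Str.len (cp ++ " " ++ p) = PySem.Str.len cp + PySem.Str.len p + 1 := by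
  simp
  have : PySem.Str.len " " = 1 := by simp [PySem.Str.len_eq]
  omega

-- pvInnerA in terms of pvTakeMerge
theorem pvInnerA_eq (max_p : Int) : ∀ (l : List String) (i j : Int) (cp : String) (idxs : List Int),
    pvInnerA max_p i l j cp idxs =
      ((pvTakeMerge max_p (PySem.Str.len cp) l).1.foldl (fun acc p => acc ++ " " ++ p) cp,
       idxs ++ (List.range (pvTakeMerge max_p (PySem.Str.len cp) l).1.length).map (fun k : Nat => i + j + 1 + (k : Int))) := by
  intro l
  induction l with
  | nil => intro i j cp idxs; simp [pvInnerA, pvTakeMerge]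
  | cons p rest ih =>
    intro i j cp idxs
    simp only [pvInnerA, pvTakeMerge]
    split
    · rw [ih, pvLen_glue]
      refine Prod.ext ?_ ?_
      · simp
      · simp only [List.length_cons]
        rw [List.append_assoc]
        congr 1
        rw [List.singleton_append]
        have hf : (List.range (pvTakeMerge max_p (PySem.Str.len cp + PySem.Str.len p + 1) rest).1.length).map
              (fun k : Nat => i + (j + 1) + 1 + (k : Int))
            = (List.range (pvTakeMerge max_p (PySem.Str.len cp + PySem.Str.len p + 1) rest).1.length).map
              (fun k : Nat => i + j + 1 + 1 + (k : Int)) :=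
          List.map_congr_left (fun t _ => by ring)
        rw [hf]
        exact pvRangeShift (i + j + 1) _
    · simp

-- outer loop skips a block of already-combined indices
theorem pvOuterA_skip (split : List String) (max_p min_p : Int) :
    ∀ (ps : List String) (s : Int) (tail : List (Int × String)) (acc : List String) (idxs : List Int),
    (∀ j : Nat, j < ps.length → (s + (j : Int)) ∈ idxs) →
    pvOuterA split max_p min_p (PySem.List.enumerate ps s ++ tail) acc idxs = pvOuterA split max_p min_p tail acc idxs := by
  intro ps
  induction ps with
  | nil => intro s tail acc idxs _; simp [PySem.List.enumerate_nil]
  | cons p ps ih =>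
    intro s tail acc idxs h
    rw [PySem.List.enumerate_cons, List.cons_append]
    have hmem : s ∈ idxs := by simpa using h 0 (by simp)
    have hc : idxs.contains s = true := by
      simp only [List.contains_eq_mem, decide_eq_true_iff]; exact hmem
    simp only [pvOuterA, hc, if_true]
    apply ih
    intro j hj
    have h2 := h (j + 1) (by simpa using hj)
    have heq : s + 1 + (j : Int) = s + ((j + 1 : Nat) : Int) := by push_cast; ring
    rw [heq]
    exact h2

-- main invariant: from position k with only stale (< k) indices recorded, A's outer loop appends pvGoB of the suffix
theorem pvMainFuel (split : List String) (max_p min_p : Int) :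
    ∀ (n : Nat) (rest : List String) (k : Nat) (acc : List String) (idxs : List Int),
    rest.length ≤ n →
    rest = split.drop k → (∀ x ∈ idxs, x < (k : Int)) →
    pvOuterA split max_p min_p (PySem.List.enumerate rest (k : Int)) acc idxs = acc ++ pvGoB max_p min_p rest := by
  intro n
  induction n with
  | zero =>
    intro rest k acc idxs hn _ _
    have : rest = [] := List.eq_nil_of_length_eq_zero (Nat.le_zero.mp hn)
    subst this
    simp [PySem.List.enumerate_nil, pvOuterA, pvGoB]
  | succ n ih =>
    intro rest k acc idxs hn hdrop hidx
    cases rest with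
    | nil => simp [PySem.List.enumerate_nil, pvOuterA, pvGoB]
    | cons para rest' =>
      rw [PySem.List.enumerate_cons]
      have hc : idxs.contains (k : Int) = false := by
        simp only [List.contains_eq_mem, decide_eq_false_iff_not]
        intro hm; exact absurd (hidx _ hm) (by omega)
      have hdrop' : rest' = split.drop (k + 1) := by
        have h1 : (split.drop k).drop 1 = split.drop (k + 1) := by
          rw [List.drop_drop]
        rw [← h1, ← hdrop]
        simp
      by_cases hmin : min_p ≤ PySem.Str.len para
      · simp only [pvOuterA, hc, Bool.false_eq_true, if_false, hmin]
        have := ih rest' (k + 1) (acc ++ [para]) idxs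
          (by simpa using Nat.le_of_succ_le_succ hn) hdrop'
          (by intro x hx; have := hidx x hx; push_cast; omega)
        push_cast at this
        rw [this, pvGoB, if_pos hmin]
        simp
      · simp only [pvOuterA, hc, Bool.false_eq_true, if_false, hmin]
        have hslice : PySem.List.slice split (some ((k : Int) + 1)) none = rest' := by
          have : ((k : Int) + 1) = ((k + 1 : Nat) : Int) := by push_cast; ring
          rw [this, PySem.List.slice_from_natCast, ← hdrop']
        rw [hslice, pvInnerA_eq]
        set parts := (pvTakeMerge max_p (PySem.Str.len para) rest').1 with hparts
        set rem := (pvTakeMerge max_p (PySem.Str.len para) rest').2 with hrem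
        have hsplitTM : parts ++ rem = rest' := pvTakeMerge_split max_p rest' (PySem.Str.len para)
        have henum : PySem.List.enumerate rest' ((k : Int) + 1)
            = PySem.List.enumerate parts ((k : Int) + 1) ++ PySem.List.enumerate rem ((k : Int) + 1 + (parts.length : Int)) := by
          conv_lhs => rw [← hsplitTM]
          exact PySem.List.enumerate_append parts rem _
        simp only []
        rw [henum, pvOuterA_skip]
        · have hdroprem : rem = split.drop (k + 1 + parts.length) := by
            rw [← List.drop_drop, ← hdrop', ← hsplitTM]
            · simp
          have hlen : rem.length ≤ n := by
            have h1 : rest'.length ≤ n := by simpa using Nat.le_of_succ_le_succ hn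
            have h2 : parts.length + rem.length = rest'.length := by
              rw [← hsplitTM]; simp
            omega
          have hidx' : ∀ x ∈ idxs ++ (List.range parts.length).map (fun t : Nat => (k : Int) + 0 + 1 + (t : Int)),
              x < ((k + 1 + parts.length : Nat) : Int) := by
            intro x hx
            rcases List.mem_append.mp hx with h | h
            · have := hidx x h; push_cast; omega
            · rcases List.mem_map.mp h with ⟨t, ht, rfl⟩
              have := List.mem_range.mp ht
              push_cast; omega
          have := ih rem (k + 1 + parts.length)
            (acc ++ [parts.foldl (fun acc p => acc ++ " " ++ p) para])
            (idxs ++ (List.range parts.length).map (fun t : Nat => (k : Int) + 0 + 1 + (t : Int)))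
            hlen hdroprem hidx'
          push_cast at this
          rw [this]
          rw [pvGoB]
          simp only [hmin, if_false]
          rw [← hparts, ← hrem, pvJoin_foldl]
          simp
        · intro j hj
          refine List.mem_append.mpr (Or.inr ?_)
          refine List.mem_map.mpr ⟨j, List.mem_range.mpr hj, ?_⟩
          ring

theorem pvMain (split : List String) (max_p min_p : Int) :
    ∀ (rest : List String) (k : Nat) (acc : List String) (idxs : List Int),
    rest = split.drop k → (∀ x ∈ idxs, x < (k : Int)) →
    pvOuterA split max_p min_p (PySem.List.enumerate rest (k : Int)) acc idxs = acc ++ pvGoB max_p min_p rest := by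
  intro rest k acc idxs h1 h2
  exact pvMainFuel split max_p min_p rest.length rest k acc idxs le_rfl h1 h2

-- ===== VERDICT (by name: the statement is the Claim_ definition above) =====
theorem combine_paragraphs_less_than_min_py_spec : Claim_equal_combine_paragraphs_less_than_min_py := by
  intro split mx mn _
  unfold Spec_combine_paragraphs_less_than_min_py combine_paragraphs_less_than_min_py combine_paragraphs_less_than_min_py_alt
  have h0 : ∀ M N : Int, pvOuterA split M N (PySem.List.enumerate split 0) [] [] = pvGoB M N split := by
    intro M N
    have h := pvMain split M N split 0 [] [] (by simp) (by simp)
    simpa using h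
  exact h0 _ _
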